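-- pv_equiv track=rewrite | github.com/parthchandak02/media-assistant | src/agents/humanizer_agent.py | _format_article_for_humanization
-- ===== SOURCE A (Python) =====
-- from typing import Dict, Any, Optional
--
-- def _format_article_for_humanization(article_dict: Dict[str, str]) -> str:
--     """Format article dictionary for humanization prompt.
--
--     Args:
--         article_dict: Article sections dictionary
--
--     Returns:
--         Formatted article text with XML tags
--     """
--     lines = []
--
--     # Order sections logically
--     section_order = ['title', 'headline', 'subheadline', 'abstract', 'lead', 'opening',
--                     'introduction', 'background', 'methodology', 'discovery', 'achievement',
--                     'results', 'the_story', 'discussion', 'impact', 'why_it_matters',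
--                     'conclusion', 'future', 'what_next', 'context', 'recognition']
--
--     # Add headline/title first if present
--     headline_content = None
--     if 'headline' in article_dict:
--         headline_content = article_dict['headline']
--     elif 'title' in article_dict:
--         headline_content = article_dict['title']
--
--     if headline_content:
--         lines.append(f"<headline>{headline_content}</headline>")
--         lines.append("")
--
--     # Add sections in order as continuous flow with XML section tags
--     for section_name in section_order:
--         if section_name in article_dict and section_name not in ['title', 'headline']:
--             content = article_dict[section_name].strip()
--             if content:
--                 lines.append(f'<section name="{section_name}">')
--                 lines.append(content)
--                 lines.append("</section>")
--                 lines.append("")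
--
--     # Add any remaining sections (except sources/references)
--     for section_name, content in article_dict.items():
--         if section_name not in section_order and section_name not in ['title', 'headline', 'sources', 'references']:
--             content = content.strip()
--             if content:
--                 lines.append(f'<section name="{section_name}">')
--                 lines.append(content)
--                 lines.append("</section>")
--                 lines.append("")
--
--     return "\n".join(lines)
-- ===== SOURCE B (Python) =====
-- def _format_article_for_humanization(article_dict):
--     """Format article dictionary via decorate-sort-undecorate: tag each kept
--     item with an integer sort key (section rank, insertion index) and sort."""
--     section_order = ['title', 'headline', 'subheadline', 'abstract', 'lead', 'opening',
--                     'introduction', 'background', 'methodology', 'discovery', 'achievement',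
--                     'results', 'the_story', 'discussion', 'impact', 'why_it_matters',
--                     'conclusion', 'future', 'what_next', 'context', 'recognition']
--     rank = {name: r for r, name in enumerate(section_order)}
--     n = len(article_dict)
--
--     lines = []
--     headline_content = article_dict.get('headline', article_dict.get('title'))
--     if headline_content:
--         lines.append(f"<headline>{headline_content}</headline>")
--         lines.append("")
--
--     decorated = [(rank.get(name, len(section_order)) * n + i, name, content)
--                  for i, (name, content) in enumerate(article_dict.items())
--                  if name not in ('title', 'headline', 'sources', 'references')]
--     for _, name, content in sorted(decorated, key=lambda t: t[0]):
--         content = content.strip()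
--         if content:
--             lines.append(f'<section name="{name}">')
--             lines.append(content)
--             lines.append("</section>")
--             lines.append("")
--
--     return "\n".join(lines)
-- ===== Notes on version B (the rewrite author's own statement) =====
-- stated objective: alternative
-- what changed: B uses decorate-sort-undecorate: each kept item gets a single integer sort key (section rank times dict size plus insertion index) and one sort of the decorated items replaces A's two ordered scans (section-order scan, then insertion-order scan).
import Mathlib
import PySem

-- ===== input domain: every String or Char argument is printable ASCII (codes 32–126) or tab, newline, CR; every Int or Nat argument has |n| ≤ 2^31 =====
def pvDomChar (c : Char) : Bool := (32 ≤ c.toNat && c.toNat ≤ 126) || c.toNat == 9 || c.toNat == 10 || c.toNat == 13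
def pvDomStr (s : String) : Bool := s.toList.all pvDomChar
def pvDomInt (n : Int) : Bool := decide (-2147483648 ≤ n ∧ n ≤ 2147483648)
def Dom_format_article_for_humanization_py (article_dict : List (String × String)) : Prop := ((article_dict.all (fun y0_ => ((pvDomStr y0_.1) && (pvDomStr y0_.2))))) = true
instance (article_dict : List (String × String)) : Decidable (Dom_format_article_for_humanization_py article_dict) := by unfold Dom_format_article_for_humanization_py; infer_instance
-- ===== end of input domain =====

-- B formats the article by decorate–sort–undecorate: each kept item gets one integer
-- sort key (section rank × size + insertion index) and a single sort replaces A's two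
-- ordered scans; objective: alternative algorithm, same asymptotic cost.


-- ===== PORT A =====
def pvSectionOrder : List String :=
  ["title", "headline", "subheadline", "abstract", "lead", "opening",
   "introduction", "background", "methodology", "discovery", "achievement",
   "results", "the_story", "discussion", "impact", "why_it_matters",
   "conclusion", "future", "what_next", "context", "recognition"]

def format_article_for_humanization_py (article_dict : List (String × String)) : String :=
  let d := PySem.Dict.ofList article_dict
  let lines : List String := []
  -- headline_content = article_dict['headline'] / article_dict['title'] / None
  let headline_content : Option String :=
    if d.contains "headline" then some (d.getD "headline" "")
    else if d.contains "title" then some (d.getD "title" "")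
    else none
  -- if headline_content: (None and "" are falsy)
  let lines :=
    match headline_content with
    | some h => if h ≠ "" then lines ++ ["<headline>" ++ h ++ "</headline>", ""] else lines
    | none => lines
  -- for section_name in section_order: …
  let lines := pvSectionOrder.foldl (fun lines name =>
    if d.contains name && !((["title", "headline"] : List String).contains name) then
      let content := PySem.Str.strip (d.getD name "")
      if content ≠ "" then
        lines ++ ["<section name=\"" ++ name ++ "\">", content, "</section>", ""]
      else lines
    else lines) lines
  -- for section_name, content in article_dict.items(): …
  let lines := d.items.foldl (fun lines p =>
    if !(pvSectionOrder.contains p.1) && !((["title", "headline", "sources", "references"] : List String).contains p.1) then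
      let content := PySem.Str.strip p.2
      if content ≠ "" then
        lines ++ ["<section name=\"" ++ p.1 ++ "\">", content, "</section>", ""]
      else lines
    else lines) lines
  PySem.Str.join "\n" lines

-- ===== PORT B =====
def format_article_for_humanization_py_alt (article_dict : List (String × String)) : String :=
  let d := PySem.Dict.ofList article_dict
  -- rank = {name: r for r, name in enumerate(section_order)}
  let rank : PySem.Dict String Int :=
    PySem.Dict.ofList ((PySem.List.enumerate pvSectionOrder).map (fun p => (p.2, p.1)))
  -- n = len(article_dict)
  let n : Int := (d.size : Int)
  -- headline_content = article_dict.get('headline', article_dict.get('title')); if headline_content: …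
  let lines : List String :=
    match (d.get? "headline").orElse (fun _ => d.get? "title") with
    | some h => if h ≠ "" then ["<headline>" ++ h ++ "</headline>", ""] else []
    | none => []
  -- decorated = [(rank.get(name, len(section_order)) * n + i, name, content) for i, (name, content) in enumerate(…) if …]
  let decorated : List (Int × String × String) :=
    ((PySem.List.enumerate d.items).filter (fun p =>
        !((["title", "headline", "sources", "references"] : List String).contains p.2.1))).map
      (fun p => (rank.getD p.2.1 (pvSectionOrder.length : Int) * n + p.1, p.2.1, p.2.2))
  -- for _, name, content in sorted(decorated, key=lambda t: t[0]): …
  let lines := (PySem.List.sorted decorated (fun t => t.1)).foldl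
    (fun lines t =>
      let content := PySem.Str.strip t.2.2
      if content ≠ "" then
        lines ++ ["<section name=\"" ++ t.2.1 ++ "\">", content, "</section>", ""]
      else lines) lines
  PySem.Str.join "\n" lines

-- ===== PRECONDITION & SPEC =====
def Spec_format_article_for_humanization_py (article_dict : List (String × String)) (out : String) : Prop := out = format_article_for_humanization_py_alt article_dict
instance (article_dict : List (String × String)) (out : String) : Decidable (Spec_format_article_for_humanization_py article_dict out) := by unfold Spec_format_article_for_humanization_py; infer_instance

-- ===== CLAIM (what is proved, stated in full; the proofs are below) =====
def Claim_equal_format_article_for_humanization_py : Prop := ∀ (article_dict : List (String × String)), Dom_format_article_for_humanization_py article_dict → Spec_format_article_for_humanization_py article_dict (format_article_for_humanization_py article_dict)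

-- ===== LEMMAS AND PROOFS =====

-- abbreviations used only by the proofs
def pvRank : PySem.Dict String Int :=
  PySem.Dict.ofList ((PySem.List.enumerate pvSectionOrder).map (fun p => (p.2, p.1)))

def pvEmit (name content0 : String) : List String :=
  let content := PySem.Str.strip content0
  if content ≠ "" then ["<section name=\"" ++ name ++ "\">", content, "</section>", ""] else []

def pvF (n : Int) (p : Int × String × String) : Int × String × String :=
  (pvRank.getD p.2.1 (pvSectionOrder.length : Int) * n + p.1, p.2.1, p.2.2)

def pvEmitT (t : Int × String × String) : List String := pvEmit t.2.1 t.2.2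

-- a conditional-append foldl is a flatMap of conditional blocks
theorem pv_foldl_append_if_block {α β : Type} (l : List α) (p : α → Bool) (f : α → List β)
    (acc : List β) :
    l.foldl (fun acc x => if p x then acc ++ f x else acc) acc
      = acc ++ l.flatMap (fun x => if p x then f x else []) := by
  have h : (fun (acc : List β) (x : α) => if p x then acc ++ f x else acc)
      = fun acc x => acc ++ (if p x then f x else []) := by
    funext acc x; by_cases h : p x = true <;> simp [h]
  rw [h, PySem.List.foldl_append_eq_flatMap]

-- flatMap over a filtered list = flatMap with the test folded in
theorem pv_flatMap_filter {α β : Type} (l : List α) (p : α → Bool) (f : α → List β) :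
    (l.filter p).flatMap f = l.flatMap (fun a => if p a then f a else []) := by
  induction l with
  | nil => rfl
  | cons a t ih =>
    by_cases h : p a = true <;> simp [h, ih]

-- on a nodup list, filtering by equality with a gives the singleton [a] (or nothing)
theorem pv_filter_beq_nodup (l : List String) (a : String) (h : l.Nodup) :
    l.filter (fun x => x == a) = if a ∈ l then [a] else [] := by
  induction l with
  | nil => simp
  | cons x t ih =>
    simp only [List.nodup_cons] at h
    by_cases hx : x = a
    · subst hx
      rw [List.filter_cons_of_pos (by simp), List.filter_eq_nil_iff.2 (fun y hy => by
        simp only [beq_iff_eq]; exact fun he => h.1 (he ▸ hy)), if_pos (List.mem_cons_self)]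
    · rw [List.filter_cons_of_neg (by simp [hx]), ih h.2]
      by_cases ha : a ∈ t <;> simp [ha, Ne.symm hx]

-- a filter-and-flatMap through the second components of an enumeration
theorem pv_enum_snd_flatMap {β : Type} (l : List (String × String)) (s : Int)
    (q : String × String → Bool) (g : String × String → List β) :
    ((PySem.List.enumerate l s).filter (fun p => q p.2)).flatMap (fun p => g p.2)
      = (l.filter q).flatMap g := by
  conv_rhs => rw [← PySem.List.map_snd_enumerate l s]
  rw [List.filter_map, List.flatMap_map]
  rfl

-- the enumeration of a list has no duplicate entries
theorem pv_enum_nodup (l : List (String × String)) (s : Int) :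
    (PySem.List.enumerate l s).Nodup :=
  (PySem.List.pairwise_lt_enumerate l s).imp (fun h => by
    intro he; subst he; exact lt_irrefl _ h)

-- keys of the rank dictionary are exactly the section names
theorem pv_rank_keys : pvRank.keys = pvSectionOrder := by decide

theorem pv_key_lt (ra rb n i j : Int) (hr : ra < rb) (hi0 : 0 ≤ i) (hin : i < n) (hj : 0 ≤ j) :
    ra * n + i < rb * n + j := by nlinarith

theorem pv_idx_bounds (l : List (String × String)) (p : Int × String × String)
    (h : p ∈ PySem.List.enumerate l 0) : 0 ≤ p.1 ∧ p.1 < (l.length : Int) := by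
  rcases (PySem.List.mem_enumerate_iff l 0 p).1 h with ⟨k, hk, hp⟩
  subst hp
  constructor <;> simp <;> omega

theorem pv_rank_getD_of_not_mem (k : String) (h : k ∉ pvSectionOrder) :
    pvRank.getD k (pvSectionOrder.length : Int) = (pvSectionOrder.length : Int) := by
  rw [PySem.Dict.getD_eq_get?_getD,
      (PySem.Dict.get?_eq_none_iff_not_mem_keys pvRank k).2 (pv_rank_keys ▸ h)]
  rfl

-- the main order lemma: sorting the decorated items puts the known sections first
-- (in section_order order) and the rest after them (in insertion order)
theorem pv_sorted_decorated (article_dict : List (String × String)) :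
    PySem.List.sorted
      (((PySem.List.enumerate (PySem.Dict.ofList article_dict).items).filter (fun p =>
          !((["title", "headline", "sources", "references"] : List String).contains p.2.1))).map
        (pvF ((PySem.Dict.ofList article_dict).size : Int)))
      (fun t => t.1)
    = (pvSectionOrder.filter (fun name => !((["title", "headline"] : List String).contains name))).flatMap
        (fun name =>
          ((PySem.List.enumerate (PySem.Dict.ofList article_dict).items).filter
              (fun p => p.2.1 == name)).map (pvF ((PySem.Dict.ofList article_dict).size : Int)))
      ++ ((PySem.List.enumerate (PySem.Dict.ofList article_dict).items).filter (fun p =>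
          !(pvSectionOrder.contains p.2.1)
            && !((["title", "headline", "sources", "references"] : List String).contains p.2.1))).map
        (pvF ((PySem.Dict.ofList article_dict).size : Int)) := by
  have hn := PySem.Dict.nodup_keys_ofList article_dict
  set l := (PySem.Dict.ofList article_dict).items with hl
  set n : Int := (l.length : Int) with hnn
  set E := PySem.List.enumerate l 0 with hE
  set SO' := pvSectionOrder.filter
      (fun name => !(((["title", "headline"] : List String)).contains name)) with hSO'
  set φ : String → List (Int × String × String) :=
      fun name => E.filter (fun p => p.2.1 == name) with hφ
  set ψR : Int × String × String → Bool := fun p =>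
      !(pvSectionOrder.contains p.2.1)
        && !((["title", "headline", "sources", "references"] : List String).contains p.2.1) with hψR
  set ψ4 : Int × String × String → Bool := fun p =>
      !((["title", "headline", "sources", "references"] : List String).contains p.2.1) with hψ4
  have hEnodup : E.Nodup := pv_enum_nodup l 0
  have hidx : ∀ p ∈ E, 0 ≤ p.1 ∧ p.1 < n := fun p hp => pv_idx_bounds l p hp
  -- members of φ name carry that name
  have hφmem : ∀ name, ∀ p ∈ φ name, p ∈ E ∧ p.2.1 = name := by
    intro name p hp
    simp only [hφ, List.mem_filter, beq_iff_eq] at hp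
    exact hp
  -- rank facts (on the literal section list)
  have hrlt : ∀ name ∈ SO', pvRank.getD name (pvSectionOrder.length : Int) < (pvSectionOrder.length : Int) := by decide
  have hrmono : List.Pairwise (fun a b =>
      pvRank.getD a (pvSectionOrder.length : Int) < pvRank.getD b (pvSectionOrder.length : Int)) SO' := by decide
  have hSO'nodup : SO'.Nodup := by decide
  -- the permutation, first at the level of enumerated pairs
  have hpairperm : (SO'.flatMap φ ++ E.filter ψR).Perm (E.filter ψ4) := by
    rw [List.perm_ext_iff_of_nodup ?_ ((List.filter_sublist).nodup hEnodup)]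
    · intro p
      simp only [List.mem_append, List.mem_flatMap, List.mem_filter, hφ, hψR, hψ4,
        beq_iff_eq, Bool.and_eq_true, Bool.not_eq_eq_eq_not, Bool.not_true,
        List.contains_eq_mem, decide_eq_false_iff_not]
      constructor
      · rintro (⟨name, hname, hpE, hpk⟩ | ⟨hpE, hSO, hsk⟩)
        · subst hpk
          refine ⟨hpE, ?_⟩
          simp only [hSO', List.mem_filter, List.contains_eq_mem,
            Bool.not_eq_eq_eq_not, Bool.not_true, decide_eq_false_iff_not] at hname
          have hin : p.2.1 ∈ pvSectionOrder := hname.1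
          have hs : p.2.1 ≠ "sources" := fun he => by rw [he] at hin; exact absurd hin (by decide)
          have hr : p.2.1 ≠ "references" := fun he => by rw [he] at hin; exact absurd hin (by decide)
          simp only [List.mem_cons, List.not_mem_nil] at hname ⊢
          tauto
        · exact ⟨hpE, hsk⟩
      · rintro ⟨hpE, hsk⟩
        by_cases hin : p.2.1 ∈ pvSectionOrder
        · left
          refine ⟨p.2.1, ?_, hpE, rfl⟩
          simp only [hSO', List.mem_filter, List.contains_eq_mem,
            Bool.not_eq_eq_eq_not, Bool.not_true, decide_eq_false_iff_not]
          refine ⟨hin, ?_⟩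
          simp only [List.mem_cons, List.not_mem_nil] at hsk ⊢
          tauto
        · right; exact ⟨hpE, hin, hsk⟩
    · rw [List.nodup_append]
      refine ⟨?_, (List.filter_sublist).nodup hEnodup, ?_⟩
      · rw [List.nodup_flatMap]
        refine ⟨fun name _ => (List.filter_sublist).nodup hEnodup, ?_⟩
        exact hSO'nodup.imp (fun {a b} hab => by
          intro p hpa hpb
          exact hab (((hφmem a p hpa).2).symm.trans ((hφmem b p hpb).2)))
      · intro x hx y hy hxy
        subst hxy
        rcases List.mem_flatMap.1 hx with ⟨name, hname, hx'⟩
        have h1 := (hφmem name x hx').2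
        simp only [hSO', List.mem_filter] at hname
        have h2 : x.2.1 ∈ pvSectionOrder := h1 ▸ hname.1
        simp only [List.mem_filter, hψR, Bool.and_eq_true, Bool.not_eq_eq_eq_not,
          Bool.not_true, List.contains_eq_mem, decide_eq_false_iff_not] at hy
        exact hy.2.1 h2
  -- rank is the section length on every surviving remaining key
  have hrR : ∀ p, ψR p = true →
      pvRank.getD p.2.1 (pvSectionOrder.length : Int) = (pvSectionOrder.length : Int) := by
    intro p hp
    simp only [hψR, Bool.and_eq_true, Bool.not_eq_eq_eq_not, Bool.not_true,
      List.contains_eq_mem, decide_eq_false_iff_not] at hp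
    exact pv_rank_getD_of_not_mem p.2.1 hp.1
  apply PySem.List.sorted_eq_of_perm_of_pairwise_lt
  · -- permutation
    have := hpairperm.map (pvF n)
    rw [List.map_append, List.map_flatMap] at this
    exact this
  · -- strictly increasing keys
    rw [List.pairwise_append]
    refine ⟨?_, ?_, ?_⟩
    · rw [List.pairwise_flatMap]
      constructor
      · intro name hname
        rw [List.pairwise_map]
        refine ((PySem.List.pairwise_lt_enumerate l 0).sublist (List.filter_sublist)).imp_of_mem ?_
        intro p q hp hq hlt
        have h1 := (hφmem name p hp).2
        have h2 := (hφmem name q hq).2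
        simp only [pvF]
        rw [h1, h2]
        omega
      · refine hrmono.imp_of_mem ?_
        intro a b ha hb hab
        intro x hx y hy
        rcases List.mem_map.1 hx with ⟨p, hp, hxp⟩
        rcases List.mem_map.1 hy with ⟨q, hq, hyq⟩
        subst hxp; subst hyq
        have h1 := hφmem a p hp
        have h2 := hφmem b q hq
        have hpb := hidx p h1.1
        have hqb := hidx q h2.1
        simp only [pvF]
        rw [h1.2, h2.2]
        exact pv_key_lt _ _ n p.1 q.1 hab hpb.1 hpb.2 hqb.1
    · rw [List.pairwise_map]
      refine ((PySem.List.pairwise_lt_enumerate l 0).sublist (List.filter_sublist)).imp_of_mem ?_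
      intro p q hp hq hlt
      simp only [List.mem_filter] at hp hq
      simp only [pvF]
      rw [hrR p hp.2, hrR q hq.2]
      omega
    · intro x hx y hy
      rcases List.mem_flatMap.1 hx with ⟨name, hname, hx'⟩
      rcases List.mem_map.1 hx' with ⟨p, hp, hxp⟩
      rcases List.mem_map.1 hy with ⟨q, hq, hyq⟩
      subst hxp; subst hyq
      simp only [List.mem_filter] at hq
      have h1 := hφmem name p hp
      have hpb := hidx p h1.1
      have hqb := hidx q hq.1
      simp only [pvF]
      rw [h1.2, hrR q hq.2]
      exact pv_key_lt _ _ n p.1 q.1 (hrlt name hname) hpb.1 hpb.2 hqb.1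

-- per name, the matching items emit exactly A's loop-1 block
theorem pv_singleton_emit (article_dict : List (String × String)) (name : String) :
    ((PySem.Dict.ofList article_dict).items.filter (fun pr => pr.1 == name)).flatMap
        (fun pr => pvEmit pr.1 pr.2)
      = if (PySem.Dict.ofList article_dict).contains name
          then pvEmit name ((PySem.Dict.ofList article_dict).getD name "") else [] := by
  have hn := PySem.Dict.nodup_keys_ofList article_dict
  rw [PySem.Dict.items_eq_map_keys (PySem.Dict.ofList article_dict) hn "", List.filter_map]
  have hc : ((fun (pr : String × String) => pr.1 == name) ∘
      fun k => (k, (PySem.Dict.ofList article_dict).getD k "")) = fun k => k == name := rfl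
  rw [hc, pv_filter_beq_nodup _ name hn]
  by_cases hm : name ∈ (PySem.Dict.ofList article_dict).keys
  · rw [if_pos hm,
      if_pos ((PySem.Dict.contains_iff_mem_keys (PySem.Dict.ofList article_dict) name).2 hm)]
    simp
  · rw [if_neg hm,
      if_neg (fun h => hm ((PySem.Dict.contains_iff_mem_keys (PySem.Dict.ofList article_dict) name).1 h))]
    simp

-- A's first loop emits exactly the known-section part of the sorted order
theorem pv_loop1_eq (article_dict : List (String × String)) :
    pvSectionOrder.flatMap (fun name =>
        if (PySem.Dict.ofList article_dict).contains name
            && !((["title", "headline"] : List String).contains name) then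
          pvEmit name ((PySem.Dict.ofList article_dict).getD name "") else [])
      = ((pvSectionOrder.filter (fun name => !((["title", "headline"] : List String).contains name))).flatMap
          (fun name =>
            ((PySem.List.enumerate (PySem.Dict.ofList article_dict).items).filter
                (fun p => p.2.1 == name)).map
              (pvF ((PySem.Dict.ofList article_dict).size : Int)))).flatMap pvEmitT := by
  rw [List.flatMap_assoc]
  have hinner : ∀ name : String,
      (((PySem.List.enumerate (PySem.Dict.ofList article_dict).items).filter
          (fun p => p.2.1 == name)).map
        (pvF ((PySem.Dict.ofList article_dict).size : Int))).flatMap pvEmitT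
      = if (PySem.Dict.ofList article_dict).contains name
          then pvEmit name ((PySem.Dict.ofList article_dict).getD name "") else [] := by
    intro name
    rw [List.flatMap_map]
    have h1 : (fun p : Int × String × String =>
        pvEmitT (pvF ((PySem.Dict.ofList article_dict).size : Int) p))
        = fun p => pvEmit p.2.1 p.2.2 := rfl
    rw [h1,
      pv_enum_snd_flatMap (PySem.Dict.ofList article_dict).items 0
        (fun pr => pr.1 == name) (fun pr => pvEmit pr.1 pr.2),
      pv_singleton_emit]
  rw [List.flatMap_congr (fun name _ => hinner name)]
  rw [pv_flatMap_filter pvSectionOrder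
    (fun name => !((["title", "headline"] : List String).contains name))
    (fun name => if (PySem.Dict.ofList article_dict).contains name
        then pvEmit name ((PySem.Dict.ofList article_dict).getD name "") else [])]
  apply List.flatMap_congr
  intro name _
  by_cases h1 : ((["title", "headline"] : List String).contains name) = true <;>
    by_cases h2 : (PySem.Dict.ofList article_dict).contains name = true <;>
      simp [h1, h2]

-- A's second loop emits exactly the remaining part of the sorted order
theorem pv_loop2_eq (article_dict : List (String × String)) :
    (PySem.Dict.ofList article_dict).items.flatMap (fun pr =>
        if !(pvSectionOrder.contains pr.1)
            && !((["title", "headline", "sources", "references"] : List String).contains pr.1) then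
          pvEmit pr.1 pr.2 else [])
      = (((PySem.List.enumerate (PySem.Dict.ofList article_dict).items).filter (fun p =>
            !(pvSectionOrder.contains p.2.1)
              && !((["title", "headline", "sources", "references"] : List String).contains p.2.1))).map
          (pvF ((PySem.Dict.ofList article_dict).size : Int))).flatMap pvEmitT := by
  rw [List.flatMap_map]
  have h1 : (fun p : Int × String × String =>
      pvEmitT (pvF ((PySem.Dict.ofList article_dict).size : Int) p))
      = fun p => pvEmit p.2.1 p.2.2 := rfl
  rw [h1,
    pv_enum_snd_flatMap (PySem.Dict.ofList article_dict).items 0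
      (fun pr => !(pvSectionOrder.contains pr.1)
        && !((["title", "headline", "sources", "references"] : List String).contains pr.1))
      (fun pr => pvEmit pr.1 pr.2),
    pv_flatMap_filter]

theorem format_article_spec_aux (article_dict : List (String × String)) :
    format_article_for_humanization_py article_dict
      = format_article_for_humanization_py_alt article_dict := by
  unfold format_article_for_humanization_py format_article_for_humanization_py_alt
  set d := PySem.Dict.ofList article_dict with hd
  have hh : (if d.contains "headline" then some (d.getD "headline" "")
      else if d.contains "title" then some (d.getD "title" "")
      else none) = (d.get? "headline").orElse (fun _ => d.get? "title") := by
    rw [PySem.Dict.contains_eq_isSome_get? d "headline", PySem.Dict.contains_eq_isSome_get? d "title"]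
    cases h1 : d.get? "headline" with
    | some v => simp [Option.orElse, PySem.Dict.getD_eq_get?_getD, h1]
    | none =>
      cases h2 : d.get? "title" with
      | some v => simp [Option.orElse, PySem.Dict.getD_eq_get?_getD, h2]
      | none => simp [Option.orElse]
  simp only [hh, List.nil_append]
  congr 1
  -- rewrite A's two loop bodies into conditional pvEmit blocks
  rw [show (fun (lines : List String) (name : String) =>
        if d.contains name && !((["title", "headline"] : List String).contains name) then
          let content := PySem.Str.strip (d.getD name "")
          if content ≠ "" then
            lines ++ ["<section name=\"" ++ name ++ "\">", content, "</section>", ""]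
          else lines
        else lines)
      = fun lines name =>
        if (d.contains name && !((["title", "headline"] : List String).contains name)) then
          lines ++ pvEmit name (d.getD name "") else lines from by
    funext lines name
    simp only [pvEmit]
    split
    · by_cases hc : PySem.Str.strip (d.getD name "") = "" <;> simp [hc]
    · rfl]
  rw [show (fun (lines : List String) (p : String × String) =>
        if !(pvSectionOrder.contains p.1) && !((["title", "headline", "sources", "references"] : List String).contains p.1) then
          let content := PySem.Str.strip p.2
          if content ≠ "" then
            lines ++ ["<section name=\"" ++ p.1 ++ "\">", content, "</section>", ""]
          else lines
        else lines)
      = fun lines p =>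
        if (!(pvSectionOrder.contains p.1) && !((["title", "headline", "sources", "references"] : List String).contains p.1)) then
          lines ++ pvEmit p.1 p.2 else lines from by
    funext lines p
    simp only [pvEmit]
    split
    · by_cases hc : PySem.Str.strip p.2 = "" <;> simp [hc]
    · rfl]
  -- rewrite B's loop body into appended pvEmitT blocks
  rw [show (fun (lines : List String) (t : Int × String × String) =>
        let content := PySem.Str.strip t.2.2
        if content ≠ "" then
          lines ++ ["<section name=\"" ++ t.2.1 ++ "\">", content, "</section>", ""]
        else lines)
      = fun lines t => lines ++ pvEmitT t from by
    funext lines t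
    simp only [pvEmitT, pvEmit]
    by_cases hc : PySem.Str.strip t.2.2 = "" <;> simp [hc]]
  rw [pv_foldl_append_if_block, pv_foldl_append_if_block, PySem.List.foldl_append_eq_flatMap]
  rw [List.append_assoc]
  congr 1
  -- identify B's decoration map with pvF and its rank dictionary with pvRank
  have hFB : (fun p : Int × String × String =>
      ((PySem.Dict.ofList ((PySem.List.enumerate pvSectionOrder).map (fun p => (p.2, p.1)))).getD
          p.2.1 (pvSectionOrder.length : Int) * (d.size : Int) + p.1, p.2.1, p.2.2))
      = pvF (d.size : Int) := rfl
  rw [hFB, pv_sorted_decorated article_dict, List.flatMap_append]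
  rw [← hd]
  congr 1
  · exact pv_loop1_eq article_dict ▸ (by rw [hd])
  · exact pv_loop2_eq article_dict ▸ (by rw [hd])

-- ===== VERDICT (by name: the statement is the Claim_ definition above) =====
theorem format_article_for_humanization_py_spec : Claim_equal_format_article_for_humanization_py := by
  intro article_dict _
  unfold Spec_format_article_for_humanization_py
  exact format_article_spec_aux article_dict
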